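-- pv_equiv track=rewrite | github.com/wenting-wang/sst-hdbm-mac | utils/plot_beh_r.py | extract_r_streaks
-- ===== SOURCE A (Python) =====
-- def extract_r_streaks(is_go_array, r_array):
--     streaks = []
--     current_streak = []
--     seen_first_stop = False
--     for go_flag, r_val in zip(is_go_array, r_array):
--         if not go_flag:
--             seen_first_stop = True
--             if len(current_streak) > 0:
--                 streaks.append(current_streak)
--                 current_streak = []
--         else:
--             if seen_first_stop: current_streak.append(r_val)
--     if len(current_streak) > 0: streaks.append(current_streak)
--     return streaks
-- ===== SOURCE B (Python) =====
-- def extract_r_streaks(is_go_array, r_array):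
--     # Pass 1: group zipped pairs into maximal runs of equal go/stop status.
--     pairs = list(zip(is_go_array, r_array))
--     runs = []
--     i = 0
--     while i < len(pairs):
--         g = bool(pairs[i][0])
--         j = i
--         while j < len(pairs) and bool(pairs[j][0]) == g:
--             j += 1
--         runs.append((g, [r for _, r in pairs[i:j]]))
--         i = j
--     # Pass 2: keep go-runs that come after the first stop-run.
--     out = []
--     seen = False
--     for g, rs in runs:
--         if not g:
--             seen = True
--         elif seen:
--             out.append(rs)
--     return out
-- ===== Notes on version B (the rewrite author's own statement) =====
-- stated objective: alternative
-- what changed: B first groups the zipped input into maximal runs of equal go/stop status and then selects the go-runs that follow the first stop-run, replacing A's element-wise accumulator/flush state machine.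
import Mathlib
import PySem

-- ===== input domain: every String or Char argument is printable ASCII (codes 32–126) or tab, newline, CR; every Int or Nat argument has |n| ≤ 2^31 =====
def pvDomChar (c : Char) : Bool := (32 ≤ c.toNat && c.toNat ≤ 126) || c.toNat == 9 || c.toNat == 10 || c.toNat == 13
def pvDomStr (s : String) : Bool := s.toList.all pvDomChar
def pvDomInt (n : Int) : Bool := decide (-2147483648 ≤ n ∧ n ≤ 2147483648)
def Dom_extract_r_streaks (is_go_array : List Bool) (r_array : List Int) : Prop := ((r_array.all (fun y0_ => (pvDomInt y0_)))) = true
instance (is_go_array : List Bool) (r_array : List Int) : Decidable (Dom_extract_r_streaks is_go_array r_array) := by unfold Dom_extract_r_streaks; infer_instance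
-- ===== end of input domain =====

-- B groups the zipped input into maximal runs of equal go/stop status and then selects
-- the go-runs after the first stop-run, replacing A's element-wise accumulator/flush state machine (alternative decomposition, same cost).


-- ===== PORT A =====
-- loop body of A's for-loop over zip(is_go_array, r_array); state = (streaks, current_streak, seen_first_stop)
def stepA (st : List (List Int) × List Int × Bool) (p : Bool × Int) : List (List Int) × List Int × Bool :=
  if !p.1 then
    (if st.2.1.length > 0 then (st.1 ++ [st.2.1], [], true) else (st.1, st.2.1, true))
  else
    (st.1, (if st.2.2 then st.2.1 ++ [p.2] else st.2.1), st.2.2)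

def extract_r_streaks (is_go_array : List Bool) (r_array : List Int) : List (List Int) :=
  let st := (is_go_array.zip r_array).foldl stepA ([], [], false)
  if st.2.1.length > 0 then st.1 ++ [st.2.1] else st.1

-- ===== PORT B =====
-- Pass 1 of Source B: the two nested while-loops peel off the maximal run of equal status
-- (takeWhile/dropWhile is exactly the inner while loop scanning j forward from i).
def runsB : List (Bool × Int) → List (Bool × List Int)
  | [] => []
  | (g, r) :: t =>
    (g, r :: (t.takeWhile (fun p => p.1 == g)).map Prod.snd) :: runsB (t.dropWhile (fun p => p.1 == g))
termination_by l => l.length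
decreasing_by
  simpa using Nat.lt_succ_of_le (List.length_dropWhile_le _ _)

-- Pass 2 of Source B: the for-loop over runs with the seen flag
def selB : List (Bool × List Int) → List (List Int) → Bool → List (List Int)
  | [], out, _ => out
  | (g, rs) :: t, out, seen =>
    if !g then selB t out true
    else selB t (if seen then out ++ [rs] else out) seen

def extract_r_streaks_alt (is_go_array : List Bool) (r_array : List Int) : List (List Int) :=
  selB (runsB (is_go_array.zip r_array)) [] false

-- ===== PRECONDITION & SPEC =====
def Spec_extract_r_streaks (is_go_array : List Bool) (r_array : List Int) (out : List (List Int)) : Prop := out = extract_r_streaks_alt is_go_array r_array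
instance (is_go_array : List Bool) (r_array : List Int) (out : List (List Int)) : Decidable (Spec_extract_r_streaks is_go_array r_array out) := by unfold Spec_extract_r_streaks; infer_instance

-- ===== CLAIM (what is proved, stated in full; the proofs are below) =====
def Claim_equal_extract_r_streaks : Prop := ∀ (is_go_array : List Bool) (r_array : List Int), Dom_extract_r_streaks is_go_array r_array → Spec_extract_r_streaks is_go_array r_array (extract_r_streaks is_go_array r_array)

-- ===== LEMMAS AND PROOFS =====

-- A's final flush, applied to the loop state
def finishA (st : List (List Int) × List Int × Bool) : List (List Int) :=
  if st.2.1.length > 0 then st.1 ++ [st.2.1] else st.1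

theorem dropWhile_head_false {α : Type} (f : α → Bool) :
    ∀ (l : List α) (x : α) (xs : List α), l.dropWhile f = x :: xs → f x = false := by
  intro l
  induction l with
  | nil => intro x xs h; simp [List.dropWhile] at h
  | cons a t ih =>
    intro x xs h
    by_cases hfa : f a = true
    · rw [List.dropWhile_cons_of_pos hfa] at h; exact ih x xs h
    · rw [List.dropWhile_cons_of_neg hfa] at h
      cases h; simpa using hfa

-- folding a run of stops from an empty current streak does nothing but keep seen = true
theorem stopRun (tw : List (Bool × Int)) (s : List (List Int))
    (h : ∀ p ∈ tw, p.1 = false) : tw.foldl stepA (s, [], true) = (s, [], true) := by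
  induction tw with
  | nil => rfl
  | cons a t ih =>
    have ha := h a (by simp)
    simp only [List.foldl_cons, stepA, ha, Bool.not_false, List.length_nil, if_true, gt_iff_lt, lt_irrefl, if_false]
    exact ih (fun p hp => h p (by simp [hp]))

-- folding a run of gos with seen = true appends their r-values to the current streak
theorem goRunT (tw : List (Bool × Int)) :
    ∀ (s : List (List Int)) (c : List Int), (∀ p ∈ tw, p.1 = true) →
    tw.foldl stepA (s, c, true) = (s, c ++ tw.map Prod.snd, true) := by
  induction tw with
  | nil => intro s c _; simp
  | cons a t ih =>
    intro s c h
    have ha := h a (by simp)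
    simp only [List.foldl_cons, stepA, ha, Bool.not_true, Bool.false_eq_true, if_false, if_true]
    rw [ih s (c ++ [a.2]) (fun p hp => h p (by simp [hp]))]
    simp

-- folding a run of gos with seen = false does nothing
theorem goRunF (tw : List (Bool × Int)) (s : List (List Int))
    (h : ∀ p ∈ tw, p.1 = true) : tw.foldl stepA (s, [], false) = (s, [], false) := by
  induction tw with
  | nil => rfl
  | cons a t ih =>
    have ha := h a (by simp)
    simp only [List.foldl_cons, stepA, ha, Bool.not_true, Bool.false_eq_true, if_false]
    exact ih (fun p hp => h p (by simp [hp]))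

-- main invariant, seen = true side
theorem mainT : ∀ (l : List (Bool × Int)) (s : List (List Int)),
    finishA (l.foldl stepA (s, [], true)) = selB (runsB l) s true := by
  intro l
  induction l using runsB.induct with
  | case1 => intro s; simp [runsB, selB, finishA]
  | case2 g r t ih =>
    intro s
    by_cases hg : g = true
    · subst hg
      have htw : ∀ p ∈ t.takeWhile (fun p => p.1 == true), p.1 = true := by
        intro p hp; have := List.mem_takeWhile_imp hp; simpa using this
      simp only [List.foldl_cons, stepA, Bool.not_true, Bool.false_eq_true, if_false,
        List.nil_append, runsB, selB, if_true]
      have hfold : List.foldl stepA (s, [r], true) t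
          = List.foldl stepA (s, r :: (t.takeWhile (fun p => p.1 == true)).map Prod.snd, true)
              (t.dropWhile (fun p => p.1 == true)) := by
        conv_lhs => rw [← List.takeWhile_append_dropWhile (p := fun p => p.1 == true) (l := t)]
        rw [List.foldl_append, goRunT _ _ _ htw, List.singleton_append]
      rw [hfold]
      rcases hdw : t.dropWhile (fun p => p.1 == true) with _ | ⟨⟨g', r'⟩, dw'⟩
      · rw [hdw]; simp [finishA, runsB, selB]
      · have hg' : g' = false := by
          have := dropWhile_head_false (fun p : Bool × Int => p.1 == true) t ⟨g', r'⟩ dw' hdw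
          simpa using this
        subst hg'
        rw [hdw]
        have hstep : stepA (s, r :: (t.takeWhile (fun p => p.1 == true)).map Prod.snd, true)
            ((false, r')) = (s ++ [r :: (t.takeWhile (fun p => p.1 == true)).map Prod.snd], [], true) := by
          simp [stepA]
        have hstep2 : stepA (s ++ [r :: (t.takeWhile (fun p => p.1 == true)).map Prod.snd], [], true)
            ((false, r')) = (s ++ [r :: (t.takeWhile (fun p => p.1 == true)).map Prod.snd], [], true) := by
          simp [stepA]
        have := ih (s ++ [r :: (t.takeWhile (fun p => p.1 == true)).map Prod.snd])
        rw [hdw, List.foldl_cons, hstep2] at this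
        rw [List.foldl_cons, hstep]
        exact this
    · have hg2 : g = false := by simpa using hg
      subst hg2
      have htw : ∀ p ∈ t.takeWhile (fun p => p.1 == false), p.1 = false := by
        intro p hp; have := List.mem_takeWhile_imp hp; simpa using this
      simp only [List.foldl_cons, stepA, Bool.not_false, List.length_nil, if_true, gt_iff_lt,
        lt_irrefl, if_false, runsB, selB]
      have hfold : List.foldl stepA (s, [], true) t
          = List.foldl stepA (s, [], true) (t.dropWhile (fun p => p.1 == false)) := by
        conv_lhs => rw [← List.takeWhile_append_dropWhile (p := fun p => p.1 == false) (l := t)]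
        rw [List.foldl_append, stopRun _ _ htw]
      rw [hfold]
      exact ih s

-- main invariant, seen = false side
theorem mainF : ∀ (l : List (Bool × Int)) (s : List (List Int)),
    finishA (l.foldl stepA (s, [], false)) = selB (runsB l) s false := by
  intro l
  induction l using runsB.induct with
  | case1 => intro s; simp [runsB, selB, finishA]
  | case2 g r t ih =>
    intro s
    by_cases hg : g = true
    · subst hg
      have htw : ∀ p ∈ t.takeWhile (fun p => p.1 == true), p.1 = true := by
        intro p hp; have := List.mem_takeWhile_imp hp; simpa using this
      simp only [List.foldl_cons, stepA, Bool.not_true, Bool.false_eq_true, if_false, runsB, selB]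
      have hfold : List.foldl stepA (s, [], false) t
          = List.foldl stepA (s, [], false) (t.dropWhile (fun p => p.1 == true)) := by
        conv_lhs => rw [← List.takeWhile_append_dropWhile (p := fun p => p.1 == true) (l := t)]
        rw [List.foldl_append, goRunF _ _ htw]
      rw [hfold]
      exact ih s
    · have hg2 : g = false := by simpa using hg
      subst hg2
      have htw : ∀ p ∈ t.takeWhile (fun p => p.1 == false), p.1 = false := by
        intro p hp; have := List.mem_takeWhile_imp hp; simpa using this
      simp only [List.foldl_cons, stepA, Bool.not_false, List.length_nil, if_true, gt_iff_lt,
        lt_irrefl, if_false, runsB, selB]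
      have hfold : List.foldl stepA (s, [], true) t
          = List.foldl stepA (s, [], true) (t.dropWhile (fun p => p.1 == false)) := by
        conv_lhs => rw [← List.takeWhile_append_dropWhile (p := fun p => p.1 == false) (l := t)]
        rw [List.foldl_append, stopRun _ _ htw]
      rw [hfold]
      exact mainT (t.dropWhile (fun p => p.1 == false)) s

-- ===== VERDICT (by name: the statement is the Claim_ definition above) =====
theorem extract_r_streaks_spec : Claim_equal_extract_r_streaks := by
  intro g r _
  unfold Spec_extract_r_streaks extract_r_streaks extract_r_streaks_alt
  exact mainF (g.zip r) []
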